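-- pv_equiv track=rewrite | github.com/jstchw/drug_search | backend/app/utils/pm_utils.py | count_entries_by_year
-- ===== SOURCE A (Python) =====
-- def count_entries_by_year(data: list) -> dict:
--     """
--     Count the number of entries in the given data by publication date.
--
--     *IMPORTANT*: If the property is 'age', the algorithm counts all age groups that the entry falls into.
--     For example: entry with age: [60, 120] will be put both in 'adult' and 'elderly' groups.
--     This is done to avoid losing data when the age is a range since the data is super sparse.
--
--     Args:
--         data (list): A list of entries to be counted.
--
--     Returns:
--         dict: A dictionary containing the counts of entries by publication date. Sorted by year.
--     """
--     counts = {}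
--
--     for entry in data:
--         pub_date = entry.get("pub_date")
--         if pub_date:
--             year = pub_date.split("-")[0]
--             counts[year] = counts.get(year, 0) + 1
--
--     return dict(sorted(counts.items(), key=lambda x: x[0]))
-- ===== SOURCE B (Python) =====
-- def count_entries_by_year(data: list) -> dict:
--     """Count entries by publication year: extract year strings, sort them,
--     then run-length-scan the sorted list (sort-then-group instead of
--     dict accumulation followed by sorting the items)."""
--     years = sorted(
--         entry["pub_date"].split("-")[0]
--         for entry in data
--         if entry.get("pub_date")
--     )
--     result = {}
--     i, n = 0, len(years)
--     while i < n:
--         j = i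
--         while j < n and years[j] == years[i]:
--             j += 1
--         result[years[i]] = j - i
--         i = j
--     return result
-- ===== Notes on version B (the rewrite author's own statement) =====
-- stated objective: alternative
-- what changed: B extracts the year strings into a list, sorts that list, and counts each maximal run in one scan, instead of A's accumulation into a dict with get-or-0 lookups followed by sorting the dict items.
import Mathlib
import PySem

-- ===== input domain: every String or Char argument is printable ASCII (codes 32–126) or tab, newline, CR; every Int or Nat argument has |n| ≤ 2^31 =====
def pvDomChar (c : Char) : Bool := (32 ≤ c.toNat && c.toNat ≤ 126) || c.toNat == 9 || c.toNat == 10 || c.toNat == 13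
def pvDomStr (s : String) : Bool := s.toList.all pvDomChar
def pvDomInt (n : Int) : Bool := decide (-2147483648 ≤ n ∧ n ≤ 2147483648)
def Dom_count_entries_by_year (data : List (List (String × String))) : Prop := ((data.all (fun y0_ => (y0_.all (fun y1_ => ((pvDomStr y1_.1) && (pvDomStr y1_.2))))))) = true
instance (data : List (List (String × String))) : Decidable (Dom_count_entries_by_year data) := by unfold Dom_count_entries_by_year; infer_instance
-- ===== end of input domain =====

-- B replaces A's dict accumulation + final items sort by: extract the year strings,
-- sort that list, and count each maximal run in one scan (sort-then-group); same cost, different decomposition.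

-- ===== PORT A =====
-- literal port of A: a dict counts accumulated over data, then sorted(counts.items(), key=x[0]).
-- pd.split("-") never raises and never returns an empty list, so .getD [] / .headD "" only totalize [0].
def count_entries_by_year (data : List (List (String × String))) : List (String × Int) :=
  let counts := data.foldl (fun counts entry =>
    match (PySem.Dict.mk entry).get? "pub_date" with
    | none => counts
    | some pub_date =>
      if pub_date = "" then counts
      else
        let year := ((PySem.Str.split? pub_date "-").getD []).headD ""
        counts.insert year (counts.getD year 0 + 1)) PySem.Dict.empty
  PySem.List.sorted counts.items (fun x => x.1)

-- ===== PORT B =====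
-- run-length scan of a sorted list: one (key, run length) pair per maximal run
-- (the takeWhile/dropWhile split is Source B's inner `while years[j] == years[i]` two-pointer scan).
def pvRuns : List String → List (String × Int)
  | [] => []
  | y :: rest =>
    let run := rest.takeWhile (fun z => z == y)
    (y, 1 + (run.length : Int)) :: pvRuns (rest.dropWhile (fun z => z == y))
  termination_by l => l.length
  decreasing_by
    have := List.length_dropWhile_le (fun z => z == y) rest
    simp; omega

def count_entries_by_year_alt (data : List (List (String × String))) : List (String × Int) :=
  let years := PySem.List.sorted (data.filterMap (fun entry =>
    match (PySem.Dict.mk entry).get? "pub_date" with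
    | none => none
    | some pub_date =>
      if pub_date = "" then none
      else some (((PySem.Str.split? pub_date "-").getD []).headD ""))) (fun y => y)
  pvRuns years

-- ===== PRECONDITION & SPEC =====
def Spec_count_entries_by_year (data : List (List (String × String))) (out : List (String × Int)) : Prop := out = count_entries_by_year_alt data
instance (data : List (List (String × String))) (out : List (String × Int)) : Decidable (Spec_count_entries_by_year data out) := by unfold Spec_count_entries_by_year; infer_instance

-- ===== CLAIM (what is proved, stated in full; the proofs are below) =====
def Claim_equal_count_entries_by_year : Prop := ∀ (data : List (List (String × String))), Dom_count_entries_by_year data → Spec_count_entries_by_year data (count_entries_by_year data)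

-- ===== LEMMAS AND PROOFS =====

-- the year extracted from one entry (A's inline `if pub_date: pub_date.split("-")[0]`, B's comprehension body)
def pvEx (entry : List (String × String)) : Option String :=
  match (PySem.Dict.mk entry).get? "pub_date" with
  | none => none
  | some pub_date =>
    if pub_date = "" then none
    else some (((PySem.Str.split? pub_date "-").getD []).headD "")

-- A's loop over entries is the counting loop over the extracted years
theorem pvFoldA (data : List (List (String × String))) (d : PySem.Dict String Int) :
    data.foldl (fun counts entry =>
      match (PySem.Dict.mk entry).get? "pub_date" with
      | none => counts
      | some pub_date =>
        if pub_date = "" then counts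
        else
          let year := ((PySem.Str.split? pub_date "-").getD []).headD ""
          counts.insert year (counts.getD year 0 + 1)) d
    = (data.filterMap pvEx).foldl (fun d y => d.insert y (d.getD y 0 + 1)) d := by
  induction data generalizing d with
  | nil => rfl
  | cons e t ih =>
    simp only [List.foldl_cons, List.filterMap_cons, pvEx]
    cases hget : (PySem.Dict.mk e).get? "pub_date" with
    | none => exact ih d
    | some pd =>
      by_cases h : pd = "" <;> simp only [h, if_pos, if_neg, not_false_iff] <;> exact ih _

-- every element of l occurs among the run keys of pvRuns l
theorem pvMemKeys (l : List String) (x : String) (hx : x ∈ l) :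
    x ∈ (pvRuns l).map Prod.fst := by
  induction l using pvRuns.induct with
  | case1 => simp at hx
  | case2 y rest ih =>
    rw [pvRuns]
    by_cases hxy : x = y
    · simp [hxy]
    · have hxr : x ∈ rest := by
        rcases List.mem_cons.1 hx with h | h
        · exact absurd h hxy
        · exact h
      rw [← List.takeWhile_append_dropWhile (p := fun z => z == y) (l := rest)] at hxr
      rcases List.mem_append.1 hxr with h | h
      · have := List.mem_takeWhile_imp h
        simp at this
        exact absurd this hxy
      · simp only [List.map_cons, List.mem_cons]
        exact Or.inr (ih h)

-- every run key of pvRuns l occurs in l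
theorem pvKeysMem (l : List String) (x : String) (hx : x ∈ (pvRuns l).map Prod.fst) :
    x ∈ l := by
  induction l using pvRuns.induct with
  | case1 => rw [pvRuns] at hx; simp at hx
  | case2 y rest ih =>
    rw [pvRuns] at hx
    simp only [List.map_cons, List.mem_cons] at hx
    rcases hx with h | h
    · simp [h]
    · have := ih h
      exact List.mem_cons_of_mem _ ((List.dropWhile_sublist _).subset this)

-- in a sorted list, everything after the leading run of y is strictly greater than y
theorem pvDropGt (y : String) (rest : List String)
    (hs : List.Pairwise (· ≤ ·) (y :: rest)) :
    ∀ z ∈ rest.dropWhile (fun z => z == y), y < z := by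
  induction rest with
  | nil => simp
  | cons r rs ih =>
    rcases List.pairwise_cons.1 hs with ⟨hyle, hrs⟩
    by_cases hr : r = y
    · intro z hz
      rw [List.dropWhile_cons] at hz
      simp only [hr] at hz
      simp only [beq_self_eq_true, if_pos] at hz
      refine ih ?_ z hz
      refine List.pairwise_cons.2 ⟨?_, (List.pairwise_cons.1 hrs).2⟩
      intro a ha
      exact hyle a (List.mem_cons_of_mem _ ha)
    · intro z hz
      rw [List.dropWhile_cons] at hz
      have hbe : (r == y) = false := by simp [hr]
      simp only [hbe] at hz
      simp only [Bool.false_eq_true, if_neg, not_false_iff] at hz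
      have hyr : y < r :=
        lt_of_le_of_ne (hyle r (List.mem_cons_self)) (fun h => hr h.symm)
      rcases List.mem_cons.1 hz with h | h
      · exact h ▸ hyr
      · exact lt_of_lt_of_le hyr ((List.pairwise_cons.1 hrs).1 z h)

-- on a sorted list, pvRuns is (its key list).map (k ↦ (k, count of k))
theorem pvRunsChar (l : List String) (hs : List.Pairwise (· ≤ ·) l) :
    pvRuns l = ((pvRuns l).map Prod.fst).map (fun k => (k, (l.count k : Int))) := by
  induction l using pvRuns.induct with
  | case1 => rw [pvRuns]; simp
  | case2 y rest ih =>
    have hd : List.Pairwise (· ≤ ·) (rest.dropWhile (fun z => z == y)) :=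
      List.Pairwise.sublist ((List.dropWhile_sublist _).cons _) hs
    have hgt := pvDropGt y rest hs
    rw [pvRuns]
    simp only [List.map_cons]
    rw [List.cons_eq_cons]
    constructor
    · -- head: 1 + run length = count of y
      have hsplit : rest.count y = (rest.takeWhile (fun z => z == y)).count y
          + (rest.dropWhile (fun z => z == y)).count y := by
        conv_lhs => rw [← List.takeWhile_append_dropWhile (p := fun z => z == y) (l := rest)]
        rw [List.count_append]
      have h1 : (rest.takeWhile (fun z => z == y)).count y
          = (rest.takeWhile (fun z => z == y)).length := by
        rw [List.count_eq_length]
        intro b hb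
        have := List.mem_takeWhile_imp hb
        simp at this
        exact this.symm
      have h2 : (rest.dropWhile (fun z => z == y)).count y = 0 := by
        rw [List.count_eq_zero]
        intro hy
        exact absurd rfl (ne_of_gt (hgt y hy))
      have hcnt : (y :: rest).count y = 1 + (rest.takeWhile (fun z => z == y)).length := by
        rw [List.count_cons_self]
        omega
      simp only [Prod.mk.injEq, true_and, hcnt]
      push_cast
      ring
    · -- tail: recurse, counts over l restrict to counts over the drop
      conv_lhs => rw [ih hd]
      apply List.map_congr_left
      intro k hk
      have hkd : k ∈ rest.dropWhile (fun z => z == y) := pvKeysMem _ _ hk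
      have hky : y < k := hgt k hkd
      have hsplit : rest.count k = (rest.takeWhile (fun z => z == y)).count k
          + (rest.dropWhile (fun z => z == y)).count k := by
        conv_lhs => rw [← List.takeWhile_append_dropWhile (p := fun z => z == y) (l := rest)]
        rw [List.count_append]
      have h0 : (rest.takeWhile (fun z => z == y)).count k = 0 := by
        rw [List.count_eq_zero]
        intro hkt
        have := List.mem_takeWhile_imp hkt
        simp at this
        exact absurd this.symm (ne_of_lt hky)
      have hne : k ≠ y := fun h => lt_irrefl y (h ▸ hky)
      have : (y :: rest).count k = (rest.dropWhile (fun z => z == y)).count k := by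
        simp only [List.count_cons, beq_iff_eq]
        rw [if_neg (Ne.symm hne), add_zero]
        omega
      simp [this]

-- the run keys of pvRuns on a sorted list are strictly increasing
theorem pvKeysLt (l : List String) (hs : List.Pairwise (· ≤ ·) l) :
    List.Pairwise (· < ·) ((pvRuns l).map Prod.fst) := by
  induction l using pvRuns.induct with
  | case1 => rw [pvRuns]; simp
  | case2 y rest ih =>
    have hd : List.Pairwise (· ≤ ·) (rest.dropWhile (fun z => z == y)) :=
      List.Pairwise.sublist ((List.dropWhile_sublist _).cons _) hs
    have hgt := pvDropGt y rest hs
    rw [pvRuns]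
    simp only [List.map_cons]
    refine List.pairwise_cons.2 ⟨?_, ih hd⟩
    intro k hk
    exact hgt k (pvKeysMem _ _ hk)

-- main bridge: sorting counter items by key = run-length scan of the sorted year list
theorem pvMain (ys : List String) :
    PySem.List.sorted (PySem.Dict.counter ys).items (fun x => x.1)
      = pvRuns (PySem.List.sorted ys (fun y => y)) := by
  set S := PySem.List.sorted ys (fun y => y) with hS
  have hsorted : List.Pairwise (· ≤ ·) S := PySem.List.sorted_pairwise ys (fun y => y)
  have hSperm : S.Perm ys := PySem.List.sorted_perm ys (fun y => y) false
  apply PySem.List.sorted_eq_of_perm_of_pairwise_lt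
  · -- (pvRuns S).Perm (counter ys).items
    rw [PySem.Dict.items_counter, pvRunsChar S hsorted]
    have hcnt : ∀ k : String, S.count k = ys.count k := fun k => hSperm.count_eq k
    have : ((pvRuns S).map Prod.fst).map (fun k => (k, (S.count k : Int)))
        = ((pvRuns S).map Prod.fst).map (fun k => (k, (ys.count k : Int))) := by
      apply List.map_congr_left
      intro k _
      rw [hcnt k]
    rw [this]
    apply List.Perm.map
    rw [List.perm_ext_iff_of_nodup ((pvKeysLt S hsorted).nodup) (PySem.Set.nodup_ofList ys)]
    intro k
    rw [PySem.Set.mem_ofList]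
    constructor
    · intro hk
      exact hSperm.mem_iff.1 (pvKeysMem _ _ hk)
    · intro hk
      exact pvMemKeys _ _ (hSperm.mem_iff.2 hk)
  · -- strict pairwise on keys
    exact List.pairwise_map.mp (pvKeysLt S hsorted)

-- ===== VERDICT (by name: the statement is the Claim_ definition above) =====
theorem count_entries_by_year_spec : Claim_equal_count_entries_by_year := by
  intro data _
  unfold Spec_count_entries_by_year count_entries_by_year count_entries_by_year_alt
  rw [pvFoldA, PySem.Dict.foldl_insert_getD_add_one_eq_counter]
  have : data.filterMap (fun entry =>
      match (PySem.Dict.mk entry).get? "pub_date" with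
      | none => none
      | some pub_date =>
        if pub_date = "" then none
        else some (((PySem.Str.split? pub_date "-").getD []).headD "")) = data.filterMap pvEx := by
    apply List.filterMap_congr
    intro e _
    rfl
  rw [this]
  exact pvMain (data.filterMap pvEx)
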